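-- pv_equiv track=rewrite | github.com/PranavMishra17/Streaming-Digit-Detector | ml_training/data/dataset_loader.py | _extract_label_from_filename
-- ===== SOURCE A (Python) =====
-- from typing import Dict, Tuple, Optional, List, Any
--
-- def _extract_label_from_filename(item: Dict) -> int:
--     """Extract digit label from filename if not in metadata."""
--     try:
--         # Attempt to extract from filename or path
--         filename = item.get('path', item.get('filename', ''))
--         # Look for digit in filename (0-9)
--         for digit in range(10):
--             if str(digit) in filename:
--                 return digit
--         return 0  # Default fallback
--     except:
--         return 0
-- ===== SOURCE B (Python) =====
-- def _extract_label_from_filename(item) -> int: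
--     """Extract digit label from filename if not in metadata."""
--     try:
--         filename = item.get('path', item.get('filename', ''))
--         best = None
--         for ch in filename:
--             if ch in '0123456789':
--                 v = int(ch)
--                 if best is None or v < best:
--                     best = v
--         return best if best is not None else 0
--     except:
--         return 0
-- ===== Notes on version B (the rewrite author's own statement) =====
-- stated objective: alternative
-- what changed: A scans for each digit 0..9 in turn with ten substring searches and returns the first one found; B makes a single left-to-right pass over the filename keeping the smallest ASCII digit character seen, returning it (or 0 if none).
import Mathlib
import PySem

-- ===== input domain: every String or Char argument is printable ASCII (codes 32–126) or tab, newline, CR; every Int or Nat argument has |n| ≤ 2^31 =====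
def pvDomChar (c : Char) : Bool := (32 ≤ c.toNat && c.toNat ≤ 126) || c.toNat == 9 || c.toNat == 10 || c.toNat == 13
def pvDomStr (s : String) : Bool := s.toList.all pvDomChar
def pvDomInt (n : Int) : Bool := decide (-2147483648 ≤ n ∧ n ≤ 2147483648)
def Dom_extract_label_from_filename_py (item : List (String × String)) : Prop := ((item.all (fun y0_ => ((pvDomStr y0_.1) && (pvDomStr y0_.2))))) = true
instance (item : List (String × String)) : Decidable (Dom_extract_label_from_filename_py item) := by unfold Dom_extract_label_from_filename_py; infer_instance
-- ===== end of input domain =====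

-- B replaces A's ten substring searches over range(10) by one left-to-right scan of the
-- filename keeping the smallest ASCII digit seen (objective: alternative single-pass algorithm).

-- ===== PORT A =====
-- the 'for digit in range(10): if str(digit) in filename: return digit' loop, early return as recursion
def pvFindDigitA (filename : String) : List Int → Int
  | [] => 0                                   -- return 0  # Default fallback
  | d :: rest =>
      if PySem.Str.isIn (PySem.Int.toStr d) filename then d
      else pvFindDigitA filename rest

def extract_label_from_filename_py (item : List (String × String)) : Int :=
  let d := PySem.Dict.mk item
  let filename := d.getD "path" (d.getD "filename" "")
  pvFindDigitA filename (PySem.List.pyRange 0 10 1)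

-- ===== PORT B =====
-- one loop step: 'if ch in "0123456789": v = int(ch); if best is None or v < best: best = v'
-- (int(ch) for an ASCII digit char is its code minus 48 — exact on that branch)
def pvScanB (best : Option Int) (c : Char) : Option Int :=
  if ("0123456789".toList).contains c then
    let v : Int := (c.toNat : Int) - 48
    match best with
    | none => some v
    | some m => if v < m then some v else some m
  else best

def extract_label_from_filename_py_alt (item : List (String × String)) : Int :=
  let d := PySem.Dict.mk item
  let filename := d.getD "path" (d.getD "filename" "")
  match filename.toList.foldl pvScanB none with
  | some m => m
  | none => 0

-- ===== PRECONDITION & SPEC =====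
def Spec_extract_label_from_filename_py (item : List (String × String)) (out : Int) : Prop := out = extract_label_from_filename_py_alt item
instance (item : List (String × String)) (out : Int) : Decidable (Spec_extract_label_from_filename_py item out) := by unfold Spec_extract_label_from_filename_py; infer_instance

-- ===== CLAIM (what is proved, stated in full; the proofs are below) =====
def Claim_equal_extract_label_from_filename_py : Prop := ∀ (item : List (String × String)), Dom_extract_label_from_filename_py item → Spec_extract_label_from_filename_py item (extract_label_from_filename_py item)

-- ===== LEMMAS AND PROOFS =====

-- a one-character needle is in a string iff the character occurs in it
theorem pv_isIn_singleton (c : Char) (s : String) :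
    PySem.Str.isIn (String.ofList [c]) s = s.toList.contains c := by
  rw [show (PySem.Str.isIn (String.ofList [c]) s = s.toList.contains c) ↔ _ from Bool.eq_iff_iff]
  rw [PySem.Str.isIn_iff_infix]
  simp [List.singleton_infix_iff]

def pvDig (c : Char) : Bool := ("0123456789".toList).contains c
def pvVal (c : Char) : Int := (c.toNat : Int) - 48
def pvVals (L : List Char) : List Int := (L.filter pvDig).map pvVal
def pvOMin (a : Option Int) (v : Int) : Option Int :=
  match a with | none => some v | some m => if v < m then some v else some m

theorem pvScanB_eq (a : Option Int) (c : Char) :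
    pvScanB a c = if pvDig c then pvOMin a (pvVal c) else a := rfl

theorem pv_dig_char (c : Char) (h : pvDig c = true) :
    0 ≤ pvVal c ∧ pvVal c ≤ 9 ∧ c = Char.ofNat (48 + (pvVal c).toNat) := by
  have h' : c = '0' ∨ c = '1' ∨ c = '2' ∨ c = '3' ∨ c = '4' ∨ c = '5' ∨ c = '6' ∨ c = '7' ∨ c = '8' ∨ c = '9' := by
    simpa [pvDig] using h
  rcases h' with h | h | h | h | h | h | h | h | h | h <;> subst h <;> decide

theorem pv_mem_vals_iff (L : List Char) (k : Nat) (hk : k < 10) :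
    ((k : Int) ∈ pvVals L) ↔ Char.ofNat (48 + k) ∈ L := by
  constructor
  · intro hm
    simp only [pvVals, List.mem_map, List.mem_filter] at hm
    obtain ⟨c, ⟨hcL, hcd⟩, hcv⟩ := hm
    obtain ⟨_, _, hce⟩ := pv_dig_char c hcd
    rw [hcv] at hce
    have hce' : c = Char.ofNat (48 + k) := by simpa using hce
    exact hce' ▸ hcL
  · intro hcL
    simp only [pvVals, List.mem_map, List.mem_filter]
    refine ⟨Char.ofNat (48 + k), ⟨hcL, ?_⟩, ?_⟩ <;> interval_cases k <;> decide

theorem pv_foldl_scan_eq (L : List Char) : ∀ acc : Option Int,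
    L.foldl pvScanB acc = (pvVals L).foldl pvOMin acc := by
  induction L with
  | nil => intro acc; rfl
  | cons c t ih =>
    intro acc
    by_cases h : pvDig c = true
    · simp [pvScanB_eq, h, pvVals, ih]
    · simp only [Bool.not_eq_true] at h
      simp [pvScanB_eq, h, pvVals, ih]

theorem pv_foldl_omin_some (l : List Int) (m : Int) :
    l.foldl pvOMin (some m) = some (l.foldl min m) := by
  induction l generalizing m with
  | nil => rfl
  | cons v t ih =>
    simp only [List.foldl_cons]
    rw [show pvOMin (some m) v = some (min m v) by
      simp only [pvOMin]; rcases lt_or_ge v m with h | h <;> simp [min_def, h]]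
    exact ih (min m v)

theorem pv_vals_bounds (L : List Char) (x : Int) (hx : x ∈ pvVals L) : 0 ≤ x ∧ x ≤ 9 := by
  simp only [pvVals, List.mem_map, List.mem_filter] at hx
  obtain ⟨c, ⟨_, hcd⟩, hcv⟩ := hx
  obtain ⟨h0, h9, _⟩ := pv_dig_char c hcd
  omega

-- A's search over [0..9], written on the character list
theorem pv_findA_eq (s : String) :
    pvFindDigitA s (PySem.List.pyRange 0 10 1) =
      (if s.toList.contains '0' then 0 else if s.toList.contains '1' then 1 else
       if s.toList.contains '2' then 2 else if s.toList.contains '3' then 3 else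
       if s.toList.contains '4' then 4 else if s.toList.contains '5' then 5 else
       if s.toList.contains '6' then 6 else if s.toList.contains '7' then 7 else
       if s.toList.contains '8' then 8 else if s.toList.contains '9' then 9 else 0) := by
  rw [show PySem.List.pyRange 0 10 1 = [0,1,2,3,4,5,6,7,8,9] from by decide]
  simp only [pvFindDigitA,
    show PySem.Int.toStr 0 = String.ofList ['0'] from rfl,
    show PySem.Int.toStr 1 = String.ofList ['1'] from rfl,
    show PySem.Int.toStr 2 = String.ofList ['2'] from rfl,
    show PySem.Int.toStr 3 = String.ofList ['3'] from rfl,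
    show PySem.Int.toStr 4 = String.ofList ['4'] from rfl,
    show PySem.Int.toStr 5 = String.ofList ['5'] from rfl,
    show PySem.Int.toStr 6 = String.ofList ['6'] from rfl,
    show PySem.Int.toStr 7 = String.ofList ['7'] from rfl,
    show PySem.Int.toStr 8 = String.ofList ['8'] from rfl,
    show PySem.Int.toStr 9 = String.ofList ['9'] from rfl,
    pv_isIn_singleton]

theorem pv_core (s : String) :
    pvFindDigitA s (PySem.List.pyRange 0 10 1) =
      (match s.toList.foldl pvScanB none with | some m => m | none => 0) := by
  rw [pv_findA_eq, pv_foldl_scan_eq]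
  rcases hv : pvVals s.toList with _ | ⟨v, t⟩
  · -- no digit character occurs in the filename: both sides give 0
    have hno : ∀ k : Nat, k < 10 → Char.ofNat (48 + k) ∉ s.toList := by
      intro k hk hmem
      have := (pv_mem_vals_iff s.toList k hk).2 hmem
      rw [hv] at this; simp at this
    have hn0 : ('0' : Char) ∉ s.toList := by
      rw [show ('0' : Char) = Char.ofNat (48 + 0) from rfl]; exact hno 0 (by norm_num)
    have hn1 : ('1' : Char) ∉ s.toList := by
      rw [show ('1' : Char) = Char.ofNat (48 + 1) from rfl]; exact hno 1 (by norm_num)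
    have hn2 : ('2' : Char) ∉ s.toList := by
      rw [show ('2' : Char) = Char.ofNat (48 + 2) from rfl]; exact hno 2 (by norm_num)
    have hn3 : ('3' : Char) ∉ s.toList := by
      rw [show ('3' : Char) = Char.ofNat (48 + 3) from rfl]; exact hno 3 (by norm_num)
    have hn4 : ('4' : Char) ∉ s.toList := by
      rw [show ('4' : Char) = Char.ofNat (48 + 4) from rfl]; exact hno 4 (by norm_num)
    have hn5 : ('5' : Char) ∉ s.toList := by
      rw [show ('5' : Char) = Char.ofNat (48 + 5) from rfl]; exact hno 5 (by norm_num)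
    have hn6 : ('6' : Char) ∉ s.toList := by
      rw [show ('6' : Char) = Char.ofNat (48 + 6) from rfl]; exact hno 6 (by norm_num)
    have hn7 : ('7' : Char) ∉ s.toList := by
      rw [show ('7' : Char) = Char.ofNat (48 + 7) from rfl]; exact hno 7 (by norm_num)
    have hn8 : ('8' : Char) ∉ s.toList := by
      rw [show ('8' : Char) = Char.ofNat (48 + 8) from rfl]; exact hno 8 (by norm_num)
    have hn9 : ('9' : Char) ∉ s.toList := by
      rw [show ('9' : Char) = Char.ofNat (48 + 9) from rfl]; exact hno 9 (by norm_num)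
    simp [hn0, hn1, hn2, hn3, hn4, hn5, hn6, hn7, hn8, hn9]
  · -- some digit occurs: B computes the minimum value m; A's chain stops exactly at m
    simp only [List.foldl_cons]
    rw [show pvOMin none v = some v from rfl, pv_foldl_omin_some]
    have hlev := (PySem.List.foldl_min_le t v).1
    have hlb := (PySem.List.foldl_min_le t v).2
    have hmem : t.foldl min v ∈ pvVals s.toList := by
      rw [hv]
      rcases PySem.List.foldl_min_mem t v with h | h
      · rw [h]; exact List.mem_cons_self
      · exact List.mem_cons_of_mem _ h
    have hmin : ∀ x ∈ pvVals s.toList, t.foldl min v ≤ x := by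
      intro x hx; rw [hv] at hx
      rcases List.mem_cons.1 hx with h | h
      · exact h ▸ hlev
      · exact hlb x h
    obtain ⟨hm0, hm9⟩ := pv_vals_bounds s.toList _ hmem
    set m := t.foldl min v with hmdef
    clear_value m
    have hq : ∀ k : Nat, (k : Int) = m → Char.ofNat (48 + k) ∈ s.toList := by
      intro k hk
      have hk10 : k < 10 := by omega
      exact (pv_mem_vals_iff s.toList k hk10).1 (hk ▸ hmem)
    have hn : ∀ k : Nat, (k : Int) < m → Char.ofNat (48 + k) ∉ s.toList := by
      intro k hk hmem'
      have hk10 : k < 10 := by omega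
      have := hmin _ ((pv_mem_vals_iff s.toList k hk10).2 hmem')
      omega
    interval_cases m
    · have hp : ('0' : Char) ∈ s.toList := by
        rw [show ('0' : Char) = Char.ofNat (48 + 0) from rfl]; exact hq 0 (by norm_num)
      simp [hp]
    · have hp : ('1' : Char) ∈ s.toList := by
        rw [show ('1' : Char) = Char.ofNat (48 + 1) from rfl]; exact hq 1 (by norm_num)
      have hn0 : ('0' : Char) ∉ s.toList := by
        rw [show ('0' : Char) = Char.ofNat (48 + 0) from rfl]; exact hn 0 (by norm_num)
      simp [hp, hn0]
    · have hp : ('2' : Char) ∈ s.toList := by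
        rw [show ('2' : Char) = Char.ofNat (48 + 2) from rfl]; exact hq 2 (by norm_num)
      have hn0 : ('0' : Char) ∉ s.toList := by
        rw [show ('0' : Char) = Char.ofNat (48 + 0) from rfl]; exact hn 0 (by norm_num)
      have hn1 : ('1' : Char) ∉ s.toList := by
        rw [show ('1' : Char) = Char.ofNat (48 + 1) from rfl]; exact hn 1 (by norm_num)
      simp [hp, hn0, hn1]
    · have hp : ('3' : Char) ∈ s.toList := by
        rw [show ('3' : Char) = Char.ofNat (48 + 3) from rfl]; exact hq 3 (by norm_num)
      have hn0 : ('0' : Char) ∉ s.toList := by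
        rw [show ('0' : Char) = Char.ofNat (48 + 0) from rfl]; exact hn 0 (by norm_num)
      have hn1 : ('1' : Char) ∉ s.toList := by
        rw [show ('1' : Char) = Char.ofNat (48 + 1) from rfl]; exact hn 1 (by norm_num)
      have hn2 : ('2' : Char) ∉ s.toList := by
        rw [show ('2' : Char) = Char.ofNat (48 + 2) from rfl]; exact hn 2 (by norm_num)
      simp [hp, hn0, hn1, hn2]
    · have hp : ('4' : Char) ∈ s.toList := by
        rw [show ('4' : Char) = Char.ofNat (48 + 4) from rfl]; exact hq 4 (by norm_num)
      have hn0 : ('0' : Char) ∉ s.toList := by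
        rw [show ('0' : Char) = Char.ofNat (48 + 0) from rfl]; exact hn 0 (by norm_num)
      have hn1 : ('1' : Char) ∉ s.toList := by
        rw [show ('1' : Char) = Char.ofNat (48 + 1) from rfl]; exact hn 1 (by norm_num)
      have hn2 : ('2' : Char) ∉ s.toList := by
        rw [show ('2' : Char) = Char.ofNat (48 + 2) from rfl]; exact hn 2 (by norm_num)
      have hn3 : ('3' : Char) ∉ s.toList := by
        rw [show ('3' : Char) = Char.ofNat (48 + 3) from rfl]; exact hn 3 (by norm_num)
      simp [hp, hn0, hn1, hn2, hn3]
    · have hp : ('5' : Char) ∈ s.toList := by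
        rw [show ('5' : Char) = Char.ofNat (48 + 5) from rfl]; exact hq 5 (by norm_num)
      have hn0 : ('0' : Char) ∉ s.toList := by
        rw [show ('0' : Char) = Char.ofNat (48 + 0) from rfl]; exact hn 0 (by norm_num)
      have hn1 : ('1' : Char) ∉ s.toList := by
        rw [show ('1' : Char) = Char.ofNat (48 + 1) from rfl]; exact hn 1 (by norm_num)
      have hn2 : ('2' : Char) ∉ s.toList := by
        rw [show ('2' : Char) = Char.ofNat (48 + 2) from rfl]; exact hn 2 (by norm_num)
      have hn3 : ('3' : Char) ∉ s.toList := by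
        rw [show ('3' : Char) = Char.ofNat (48 + 3) from rfl]; exact hn 3 (by norm_num)
      have hn4 : ('4' : Char) ∉ s.toList := by
        rw [show ('4' : Char) = Char.ofNat (48 + 4) from rfl]; exact hn 4 (by norm_num)
      simp [hp, hn0, hn1, hn2, hn3, hn4]
    · have hp : ('6' : Char) ∈ s.toList := by
        rw [show ('6' : Char) = Char.ofNat (48 + 6) from rfl]; exact hq 6 (by norm_num)
      have hn0 : ('0' : Char) ∉ s.toList := by
        rw [show ('0' : Char) = Char.ofNat (48 + 0) from rfl]; exact hn 0 (by norm_num)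
      have hn1 : ('1' : Char) ∉ s.toList := by
        rw [show ('1' : Char) = Char.ofNat (48 + 1) from rfl]; exact hn 1 (by norm_num)
      have hn2 : ('2' : Char) ∉ s.toList := by
        rw [show ('2' : Char) = Char.ofNat (48 + 2) from rfl]; exact hn 2 (by norm_num)
      have hn3 : ('3' : Char) ∉ s.toList := by
        rw [show ('3' : Char) = Char.ofNat (48 + 3) from rfl]; exact hn 3 (by norm_num)
      have hn4 : ('4' : Char) ∉ s.toList := by
        rw [show ('4' : Char) = Char.ofNat (48 + 4) from rfl]; exact hn 4 (by norm_num)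
      have hn5 : ('5' : Char) ∉ s.toList := by
        rw [show ('5' : Char) = Char.ofNat (48 + 5) from rfl]; exact hn 5 (by norm_num)
      simp [hp, hn0, hn1, hn2, hn3, hn4, hn5]
    · have hp : ('7' : Char) ∈ s.toList := by
        rw [show ('7' : Char) = Char.ofNat (48 + 7) from rfl]; exact hq 7 (by norm_num)
      have hn0 : ('0' : Char) ∉ s.toList := by
        rw [show ('0' : Char) = Char.ofNat (48 + 0) from rfl]; exact hn 0 (by norm_num)
      have hn1 : ('1' : Char) ∉ s.toList := by
        rw [show ('1' : Char) = Char.ofNat (48 + 1) from rfl]; exact hn 1 (by norm_num)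
      have hn2 : ('2' : Char) ∉ s.toList := by
        rw [show ('2' : Char) = Char.ofNat (48 + 2) from rfl]; exact hn 2 (by norm_num)
      have hn3 : ('3' : Char) ∉ s.toList := by
        rw [show ('3' : Char) = Char.ofNat (48 + 3) from rfl]; exact hn 3 (by norm_num)
      have hn4 : ('4' : Char) ∉ s.toList := by
        rw [show ('4' : Char) = Char.ofNat (48 + 4) from rfl]; exact hn 4 (by norm_num)
      have hn5 : ('5' : Char) ∉ s.toList := by
        rw [show ('5' : Char) = Char.ofNat (48 + 5) from rfl]; exact hn 5 (by norm_num)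
      have hn6 : ('6' : Char) ∉ s.toList := by
        rw [show ('6' : Char) = Char.ofNat (48 + 6) from rfl]; exact hn 6 (by norm_num)
      simp [hp, hn0, hn1, hn2, hn3, hn4, hn5, hn6]
    · have hp : ('8' : Char) ∈ s.toList := by
        rw [show ('8' : Char) = Char.ofNat (48 + 8) from rfl]; exact hq 8 (by norm_num)
      have hn0 : ('0' : Char) ∉ s.toList := by
        rw [show ('0' : Char) = Char.ofNat (48 + 0) from rfl]; exact hn 0 (by norm_num)
      have hn1 : ('1' : Char) ∉ s.toList := by
        rw [show ('1' : Char) = Char.ofNat (48 + 1) from rfl]; exact hn 1 (by norm_num)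
      have hn2 : ('2' : Char) ∉ s.toList := by
        rw [show ('2' : Char) = Char.ofNat (48 + 2) from rfl]; exact hn 2 (by norm_num)
      have hn3 : ('3' : Char) ∉ s.toList := by
        rw [show ('3' : Char) = Char.ofNat (48 + 3) from rfl]; exact hn 3 (by norm_num)
      have hn4 : ('4' : Char) ∉ s.toList := by
        rw [show ('4' : Char) = Char.ofNat (48 + 4) from rfl]; exact hn 4 (by norm_num)
      have hn5 : ('5' : Char) ∉ s.toList := by
        rw [show ('5' : Char) = Char.ofNat (48 + 5) from rfl]; exact hn 5 (by norm_num)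
      have hn6 : ('6' : Char) ∉ s.toList := by
        rw [show ('6' : Char) = Char.ofNat (48 + 6) from rfl]; exact hn 6 (by norm_num)
      have hn7 : ('7' : Char) ∉ s.toList := by
        rw [show ('7' : Char) = Char.ofNat (48 + 7) from rfl]; exact hn 7 (by norm_num)
      simp [hp, hn0, hn1, hn2, hn3, hn4, hn5, hn6, hn7]
    · have hp : ('9' : Char) ∈ s.toList := by
        rw [show ('9' : Char) = Char.ofNat (48 + 9) from rfl]; exact hq 9 (by norm_num)
      have hn0 : ('0' : Char) ∉ s.toList := by
        rw [show ('0' : Char) = Char.ofNat (48 + 0) from rfl]; exact hn 0 (by norm_num)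
      have hn1 : ('1' : Char) ∉ s.toList := by
        rw [show ('1' : Char) = Char.ofNat (48 + 1) from rfl]; exact hn 1 (by norm_num)
      have hn2 : ('2' : Char) ∉ s.toList := by
        rw [show ('2' : Char) = Char.ofNat (48 + 2) from rfl]; exact hn 2 (by norm_num)
      have hn3 : ('3' : Char) ∉ s.toList := by
        rw [show ('3' : Char) = Char.ofNat (48 + 3) from rfl]; exact hn 3 (by norm_num)
      have hn4 : ('4' : Char) ∉ s.toList := by
        rw [show ('4' : Char) = Char.ofNat (48 + 4) from rfl]; exact hn 4 (by norm_num)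
      have hn5 : ('5' : Char) ∉ s.toList := by
        rw [show ('5' : Char) = Char.ofNat (48 + 5) from rfl]; exact hn 5 (by norm_num)
      have hn6 : ('6' : Char) ∉ s.toList := by
        rw [show ('6' : Char) = Char.ofNat (48 + 6) from rfl]; exact hn 6 (by norm_num)
      have hn7 : ('7' : Char) ∉ s.toList := by
        rw [show ('7' : Char) = Char.ofNat (48 + 7) from rfl]; exact hn 7 (by norm_num)
      have hn8 : ('8' : Char) ∉ s.toList := by
        rw [show ('8' : Char) = Char.ofNat (48 + 8) from rfl]; exact hn 8 (by norm_num)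
      simp [hp, hn0, hn1, hn2, hn3, hn4, hn5, hn6, hn7, hn8]

-- ===== VERDICT (by name: the statement is the Claim_ definition above) =====
theorem extract_label_from_filename_py_spec : Claim_equal_extract_label_from_filename_py := by
  intro item _
  unfold Spec_extract_label_from_filename_py extract_label_from_filename_py extract_label_from_filename_py_alt
  exact pv_core _
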